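-- pv_equiv track=rewrite | github.com/collinsakenga/codewars_solutions | 6 kyu/Madhav array.py | is_madhav_array
-- ===== SOURCE A (Python) =====
-- def is_madhav_array(arr):
--     if len(arr)<=1:
--         return False
--     low=1
--     high=3
--     increment=3
--     compare=arr[0]
--     while high<=len(arr):
--         if sum(arr[low:high])!=compare:
--             return False
--         low, high=high, high+increment
--         increment+=1
--     return True if (high-increment+1)==len(arr) else False
-- ===== SOURCE B (Python) =====
-- def is_madhav_array(arr):
--     if len(arr) <= 1:
--         return False
--     head = arr[0]
--     seg_len = 2   # length of the segment currently being accumulated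
--     acc = 0       # running sum within the current segment
--     cnt = 0       # elements consumed of the current segment
--     for x in arr[1:]:
--         acc += x
--         cnt += 1
--         if cnt == seg_len:
--             if acc != head:
--                 return False
--             seg_len += 1
--             acc = 0
--             cnt = 0
--     return cnt == 0
-- ===== Notes on version B (the rewrite author's own statement) =====
-- stated objective: alternative
-- what changed: B is a single flat pass over the elements with a running accumulator and a per-segment counter (no slicing, no repeated sum() calls); the non-triangular-length case falls out as the pass ending mid-segment (cnt != 0), whereas A repeatedly materialises and sums slices in a grown-window while-loop and decides validity from the loop's exit arithmetic.
import Mathlib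
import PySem

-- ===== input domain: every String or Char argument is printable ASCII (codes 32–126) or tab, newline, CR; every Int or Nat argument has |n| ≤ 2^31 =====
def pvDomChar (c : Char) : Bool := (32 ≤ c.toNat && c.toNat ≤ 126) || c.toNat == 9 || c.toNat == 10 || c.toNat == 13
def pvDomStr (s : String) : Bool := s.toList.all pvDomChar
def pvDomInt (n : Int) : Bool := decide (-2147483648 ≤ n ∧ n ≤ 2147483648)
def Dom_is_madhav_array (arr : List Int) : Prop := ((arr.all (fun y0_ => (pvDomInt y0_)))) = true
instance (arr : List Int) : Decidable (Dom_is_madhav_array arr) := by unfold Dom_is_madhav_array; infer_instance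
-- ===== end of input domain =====

-- B replaces A's grown-window while-loop over repeatedly summed slices by ONE flat pass over
-- the elements with a running accumulator and a per-segment counter; a non-triangular length
-- shows up as the pass ending mid-segment. Objective: alternative decomposition, same cost.

-- ===== PORT A =====
-- A's while-loop; fuel bounds the iteration count (the loop runs at most arr.length times
-- since high grows by increment ≥ 3 each step), the 0-fuel branch is never reached below.
def madhavWhile (arr : List Int) (compare : Int) : Nat → Int → Int → Int → Bool
  | 0, _, _, _ => false
  | fuel+1, low, high, increment =>
    if high ≤ (arr.length : Int) then
      if (PySem.List.slice arr (some low) (some high)).sum ≠ compare then false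
      else madhavWhile arr compare fuel high (high + increment) (increment + 1)
    else if high - increment + 1 = (arr.length : Int) then true else false

def is_madhav_array (arr : List Int) : Bool :=
  if arr.length ≤ 1 then false
  else
    -- compare = arr[0]; the list is nonempty here by the guard, so headI is exact
    madhavWhile arr arr.headI (arr.length + 1) 1 3 3

-- ===== PORT B =====
-- B's for-loop over arr[1:], carrying (acc, cnt, segLen); at the end: cnt == 0.
def altLoop (head : Int) : List Int → Int → Nat → Nat → Bool
  | [], _, cnt, _ => cnt == 0
  | x :: rest, acc, cnt, segLen =>
    let acc' := acc + x
    let cnt' := cnt + 1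
    if cnt' = segLen then
      if acc' ≠ head then false
      else altLoop head rest 0 0 (segLen + 1)
    else altLoop head rest acc' cnt' segLen

def is_madhav_array_alt (arr : List Int) : Bool :=
  if arr.length ≤ 1 then false
  else altLoop arr.headI (PySem.List.slice arr (some 1) none) 0 0 2

-- ===== PRECONDITION & SPEC =====
def Spec_is_madhav_array (arr : List Int) (out : Bool) : Prop := out = is_madhav_array_alt arr
instance (arr : List Int) (out : Bool) : Decidable (Spec_is_madhav_array arr out) := by unfold Spec_is_madhav_array; infer_instance

-- ===== CLAIM =====
def Claim_equal_is_madhav_array : Prop := ∀ (arr : List Int), Dom_is_madhav_array arr → Spec_is_madhav_array arr (is_madhav_array arr)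

-- ===== LEMMAS AND PROOFS =====

def tri : Nat → Nat
  | 0 => 0
  | s+1 => tri s + (s+1)

theorem tri_succ_cast (t : Nat) : ((tri (t+1) : Nat) : Int) = ((tri t : Nat) : Int) + (t : Int) + 1 := by
  rw [tri]; push_cast; ring

-- B consumes a full segment of s - cnt remaining elements: one slice-sum comparison.
theorem altLoop_seg (c : Int) : ∀ (xs : List Int) (acc : Int) (cnt s : Nat), cnt < s → s - cnt ≤ xs.length →
    altLoop c xs acc cnt s =
      if acc + (xs.take (s - cnt)).sum ≠ c then false
      else altLoop c (xs.drop (s - cnt)) 0 0 (s + 1) := by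
  intro xs
  induction xs with
  | nil => intro acc cnt s h1 h2; simp at h2; omega
  | cons x rest ih =>
    intro acc cnt s h1 h2
    rw [altLoop]
    by_cases hc : cnt + 1 = s
    · simp only [hc, if_pos]
      have hs : s - cnt = 1 := by omega
      simp [hs, add_comm]
    · rw [if_neg hc]
      have hsc : s - cnt = (s - (cnt + 1)) + 1 := by omega
      rw [ih (acc + x) (cnt + 1) s (by omega) (by simp at h2 ⊢; omega)]
      simp only [hsc, List.take_succ_cons, List.drop_succ_cons, List.sum_cons]
      have : acc + x + (rest.take (s - (cnt + 1))).sum = acc + (x + (rest.take (s - (cnt+1))).sum) := by ring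
      rw [this]

-- B runs out of elements mid-segment: result is whether nothing of the segment was consumed.
theorem altLoop_short (c : Int) : ∀ (xs : List Int) (acc : Int) (cnt s : Nat), cnt + xs.length < s →
    altLoop c xs acc cnt s = decide (cnt + xs.length = 0) := by
  intro xs
  induction xs with
  | nil => intro acc cnt s _; cases cnt <;> simp [altLoop]
  | cons x rest ih =>
    intro acc cnt s h
    rw [altLoop]
    have hne : ¬ (cnt + 1 = s) := by simp at h; omega
    rw [if_neg hne, ih (acc + x) (cnt + 1) s (by simp at h ⊢; omega)]
    simp

-- The bridge: A's grown window at triangular position tri t equals B's flat pass on the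
-- suffix arr.drop (tri t) with a fresh segment of target length t + 1.
theorem bridge (arr : List Int) (c : Int) :
    ∀ (fuel t : Nat), 1 ≤ t → tri t ≤ arr.length → arr.length < tri t + fuel →
      madhavWhile arr c fuel ((tri t : Nat) : Int) ((tri (t+1) : Nat) : Int) ((t : Int) + 2)
        = altLoop c (arr.drop (tri t)) 0 0 (t + 1) := by
  intro fuel
  induction fuel with
  | zero => intro t _ h1 h2; omega
  | succ f ih =>
    intro t ht h1 h2
    rw [madhavWhile]
    by_cases hc : ((tri (t+1) : Nat) : Int) ≤ (arr.length : Int)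
    · rw [if_pos hc]
      have hcn : tri (t+1) ≤ arr.length := by exact_mod_cast hc
      have hlen : t + 1 ≤ (arr.drop (tri t)).length := by
        rw [List.length_drop]; rw [tri] at hcn; omega
      have hslice : PySem.List.slice arr (some ((tri t : Nat) : Int)) (some ((tri (t+1) : Nat) : Int))
          = (arr.drop (tri t)).take (t + 1) := by
        have : ((tri (t+1) : Nat) : Int) = ((tri t : Nat) : Int) + ((t + 1 : Nat) : Int) := by
          rw [tri_succ_cast]; push_cast; ring
        rw [this, PySem.List.slice_natCast_add]
      rw [hslice]
      rw [altLoop_seg c (arr.drop (tri t)) 0 0 (t+1) (by omega) (by simpa using hlen)]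
      simp only [Nat.sub_zero, zero_add]
      by_cases hm : ((arr.drop (tri t)).take (t+1)).sum ≠ c
      · rw [if_pos hm, if_pos hm]
      · rw [if_neg hm, if_neg hm]
        have h2' : ((tri (t+1) : Nat) : Int) + ((t : Int) + 2) = ((tri (t+1+1) : Nat) : Int) := by
          rw [tri_succ_cast (t+1)]; push_cast; ring
        have h3 : ((t : Int) + 2) + 1 = ((t + 1 : Nat) : Int) + 2 := by push_cast; ring
        have hdrop : (arr.drop (tri t)).drop (t + 1) = arr.drop (tri (t+1)) := by
          rw [List.drop_drop]; congr 1
        rw [h2', h3, hdrop]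
        exact ih (t+1) (by omega) hcn (by have ht2 : tri (t+1) = tri t + (t+1) := rfl; omega)
    · rw [if_neg hc]
      have hcn : arr.length < tri (t+1) := by
        by_contra h; exact hc (by exact_mod_cast Nat.not_lt.mp h)
      have hcond : (((tri (t+1) : Nat) : Int) - ((t : Int) + 2) + 1 = (arr.length : Int))
          ↔ (tri t = arr.length) := by
        rw [tri_succ_cast]; omega
      have hshort : 0 + (arr.drop (tri t)).length < t + 1 := by
        rw [List.length_drop]; rw [tri] at hcn; omega
      rw [altLoop_short c (arr.drop (tri t)) 0 0 (t+1) hshort]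
      by_cases he : tri t = arr.length
      · rw [if_pos (hcond.mpr he)]
        simp [he]
      · rw [if_neg (fun h => he (hcond.mp h))]
        simp only [List.length_drop, zero_add]
        have : ¬ (arr.length - tri t = 0) := by omega
        simp [this]

-- ===== VERDICT =====
theorem is_madhav_array_spec : Claim_equal_is_madhav_array := by
  intro arr _
  unfold Spec_is_madhav_array is_madhav_array is_madhav_array_alt
  by_cases h1 : arr.length ≤ 1
  · simp [h1]
  · simp only [h1, if_false]
    have hB := bridge arr arr.headI (arr.length + 1) 1 le_rfl (by simp [tri]; omega) (by simp [tri]; omega)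
    have e1 : ((tri 1 : Nat) : Int) = 1 := by decide
    have e2 : ((tri (1+1) : Nat) : Int) = 3 := by decide
    rw [e1, e2] at hB
    norm_num at hB
    rw [hB]
    have hdrop : arr.drop (tri 1) = PySem.List.slice arr (some 1) none := by
      rw [show ((1 : Int)) = ((1 : Nat) : Int) by norm_num, PySem.List.slice_from_natCast]
      rfl
    rw [hdrop]
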